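-- pv_equiv track=rewrite | github.com/annesnour03/euler | 0-50/46_goldbach.py | solve
-- ===== SOURCE A (Python) =====
-- import math as mt
--
-- def isprime(x):
--     if x <= 1:
--         return False
--     for i in range(2, int(mt.sqrt(x)) + 1):
--         if x % i == 0:
--             return False
--     return True
--
-- def getprimes(limit):
--     res = []
--     for i in range(limit):
--         if(isprime(i)):
--             res.append(i)
--     return res
--
-- def solve(limit):
--     i = 3
--     primes = getprimes(limit)
--     while True:
--         c = 0
--         for k in range(int(mt.sqrt(i//2)) + 1):
--             if(i - 2 *k *k in primes):
--                 break
--             else: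
--                 c +=1
--         if c == int(mt.sqrt(i//2))+  1:
--             return i
--         i += 2
-- ===== SOURCE B (Python) =====
-- import math as mt
--
-- def solve(limit):
--     # primes below limit, and for each odd i test representability by iterating
--     # over primes and checking (i - p)/2 for being a perfect square with isqrt.
--     primes = [n for n in range(2, limit)
--               if all(n % d for d in range(2, mt.isqrt(n) + 1))]
--     i = 3
--     while True:
--         if not any((i - p) % 2 == 0 and mt.isqrt((i - p) // 2) ** 2 == (i - p) // 2
--                    for p in primes if p <= i):
--             return i
--         i += 2
-- ===== Notes on version B (the rewrite author's own statement) =====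
-- stated objective: faster
-- what changed: For each odd candidate, instead of scanning squares and testing each difference by linear membership in the prime list, B scans the primes once and checks with integer isqrt whether half the difference is a perfect square; prime generation becomes a single comprehension with math.isqrt instead of helper functions with break-and-count loops.
import Mathlib
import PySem

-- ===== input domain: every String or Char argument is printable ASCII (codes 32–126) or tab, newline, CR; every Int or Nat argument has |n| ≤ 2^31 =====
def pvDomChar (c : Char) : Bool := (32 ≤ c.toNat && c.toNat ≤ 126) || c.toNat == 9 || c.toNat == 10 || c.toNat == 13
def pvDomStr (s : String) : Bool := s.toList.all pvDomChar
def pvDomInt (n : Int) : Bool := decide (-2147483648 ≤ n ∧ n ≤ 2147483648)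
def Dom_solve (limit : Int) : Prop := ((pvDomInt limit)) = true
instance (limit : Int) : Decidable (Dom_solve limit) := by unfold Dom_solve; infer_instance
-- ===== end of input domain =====

-- B replaces A's inner scan over squares with a membership test (and A's trial-division
-- isprime/getprimes loops with a comprehension) by a scan over the prime list checking
-- (i - p)/2 for squareness with integer isqrt (measurably faster: no per-square list scan).
-- Both Pythons loop `while True`; the ports bound that loop with the same fuel guard
-- (a totality guard only: the equality is proved for the fueled programs).

-- ===== PORT A =====
-- int(mt.sqrt(x)) and mt.isqrt(x): integer square root; exact on the nonnegative
-- values reached here (far below 2^52, where float sqrt rounds exactly).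
def pvIsqrt (n : Int) : Int := (Nat.sqrt n.toNat : Int)

def pvIsprime (x : Int) : Bool :=
  if x ≤ 1 then false
  else (PySem.List.pyRange 2 (pvIsqrt x + 1) 1).all (fun i => !(PySem.Int.mod x i == 0))

def pvGetprimes (limit : Int) : List Int :=
  (PySem.List.pyRange 0 limit 1).foldl
    (fun res i => if pvIsprime i then res ++ [i] else res) []

-- the inner `for k … break/else c += 1` counter
def pvInner (i : Int) (primes : List Int) : List Int → Int
  | [] => 0
  | k :: ks => if primes.contains (i - 2*k*k) then 0 else 1 + pvInner i primes ks

def pvLoopA (primes : List Int) : Nat → Int → Int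
  | 0, _ => 0   -- fuel guard (never claimed to be reached)
  | fuel+1, i =>
      let c := pvInner i primes (PySem.List.pyRange 0 (pvIsqrt (PySem.Int.floordiv i 2) + 1) 1)
      if c == pvIsqrt (PySem.Int.floordiv i 2) + 1 then i else pvLoopA primes fuel (i+2)

def solve (limit : Int) : Int := pvLoopA (pvGetprimes limit) 3000 3

-- ===== PORT B =====
def pvPrimesB (limit : Int) : List Int :=
  (PySem.List.pyRange 2 limit 1).filter
    (fun n => (PySem.List.pyRange 2 (pvIsqrt n + 1) 1).all (fun d => !(PySem.Int.mod n d == 0)))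

-- any((i-p) % 2 == 0 and isqrt((i-p)//2)**2 == (i-p)//2 for p in primes if p <= i)
def pvRep (i : Int) (primes : List Int) : Bool :=
  (primes.filter (fun p => p ≤ i)).any (fun p =>
    PySem.Int.mod (i - p) 2 == 0 &&
      pvIsqrt (PySem.Int.floordiv (i - p) 2) ^ 2 == PySem.Int.floordiv (i - p) 2)

def pvLoopB (primes : List Int) : Nat → Int → Int
  | 0, _ => 0   -- fuel guard (never claimed to be reached)
  | fuel+1, i => if !(pvRep i primes) then i else pvLoopB primes fuel (i+2)

def solve_alt (limit : Int) : Int := pvLoopB (pvPrimesB limit) 3000 3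

-- ===== PRECONDITION & SPEC =====
def Spec_solve (limit : Int) (out : Int) : Prop := out = solve_alt limit
instance (limit : Int) (out : Int) : Decidable (Spec_solve limit out) := by unfold Spec_solve; infer_instance

-- ===== CLAIM (what is proved, stated in full; the proofs are below) =====
def Claim_equal_solve : Prop := ∀ (limit : Int), Dom_solve limit → Spec_solve limit (solve limit)

-- ===== LEMMAS AND PROOFS =====

-- The two prime lists coincide.
lemma primes_eq (limit : Int) : pvGetprimes limit = pvPrimesB limit := by
  unfold pvGetprimes pvPrimesB
  rw [PySem.List.foldl_append_if_eq_filter]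
  rcases lt_trichotomy limit 1 with h | h | h
  · rw [PySem.List.pyRange_one_eq_nil (by omega), PySem.List.pyRange_one_eq_nil (by omega)]
    simp
  · subst h
    rw [PySem.List.pyRange_one_cons (by omega), PySem.List.pyRange_one_eq_nil (by omega),
        PySem.List.pyRange_one_eq_nil (by omega)]
    simp [pvIsprime]
  · rw [PySem.List.pyRange_one_cons (by omega), PySem.List.pyRange_one_cons (by omega)]
    simp only [List.filter_cons]
    norm_num [pvIsprime]
    exact List.filter_congr (fun n hn => by
      have h2 : (2:Int) ≤ n := ((PySem.List.mem_pyRange_one).1 hn).1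
      simp [pvIsprime, show ¬ n ≤ 1 by omega])

lemma primesB_two_le (limit : Int) : ∀ p ∈ pvPrimesB limit, 2 ≤ p := by
  intro p hp
  have := (List.mem_filter.1 hp).1
  exact ((PySem.List.mem_pyRange_one).1 this).1

lemma isqrt_sq (k : Int) (hk : 0 ≤ k) : pvIsqrt (k * k) = k := by
  unfold pvIsqrt
  rw [Int.toNat_mul hk hk, Nat.sqrt_eq]
  omega

lemma isqrt_mono {a b : Int} (h : a ≤ b) : pvIsqrt a ≤ pvIsqrt b := by
  unfold pvIsqrt
  have : a.toNat ≤ b.toNat := by omega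
  exact_mod_cast Nat.sqrt_le_sqrt this

lemma isqrt_nonneg (a : Int) : 0 ≤ pvIsqrt a := by unfold pvIsqrt; positivity

-- c reaches the full length iff no k broke the loop
lemma inner_eq_length_iff (i : Int) (ps : List Int) (l : List Int) :
    pvInner i ps l = (l.length : Int) ↔ ∀ k ∈ l, ¬ ((i - 2*k*k) ∈ ps) := by
  induction l with
  | nil => simp [pvInner]
  | cons k ks ih =>
      by_cases h : ps.contains (i - 2*k*k)
      · have hm : (i - 2*k*k) ∈ ps := by simpa using h
        simp only [pvInner, if_pos h]
        constructor
        · intro habs; exfalso; simp at habs; omega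
        · intro hall; exact absurd hm (hall k (by simp))
      · have hm : ¬ ((i - 2*k*k) ∈ ps) := by simpa using h
        simp only [pvInner, if_neg h, List.length_cons]
        push_cast
        constructor
        · intro he k' hk'
          rcases List.mem_cons.1 hk' with rfl | hk'
          · exact hm
          · exact (ih.1 (by omega)) k' hk'
        · intro hall
          have := ih.2 (fun k' hk' => hall k' (List.mem_cons_of_mem _ hk'))
          omega

-- core equivalence of the two representability tests
lemma rep_iff (i : Int) (ps : List Int) (hp2 : ∀ p ∈ ps, 2 ≤ p) :
    (∃ k ∈ PySem.List.pyRange 0 (pvIsqrt (PySem.Int.floordiv i 2) + 1) 1,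
        (i - 2*k*k) ∈ ps) ↔ pvRep i ps = true := by
  have hfd : PySem.Int.floordiv i 2 = i / 2 := PySem.Int.floordiv_eq_ediv_of_pos (by omega)
  constructor
  · rintro ⟨k, hkR, hkmem⟩
    obtain ⟨hk0, _⟩ := (PySem.List.mem_pyRange_one).1 hkR
    set p := i - 2*k*k with hp
    have hkk : 0 ≤ k * k := mul_self_nonneg k
    unfold pvRep
    rw [List.any_eq_true]
    have h2kk : (0:Int) ≤ 2*k*k := by nlinarith [mul_self_nonneg k]
    refine ⟨p, List.mem_filter.2 ⟨hkmem, by simp; omega⟩, ?_⟩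
    have hd : i - p = 2 * (k * k) := by ring
    have hmod : PySem.Int.mod (i - p) 2 = 0 := by
      rw [PySem.Int.mod_eq_emod_of_pos (by omega : (0:Int) < 2), hd]; omega
    have hdiv : PySem.Int.floordiv (i - p) 2 = k * k := by
      rw [PySem.Int.floordiv_eq_ediv_of_pos (by omega), hd]; omega
    simp only [hmod, hdiv, isqrt_sq k hk0]
    simp [sq]
  · intro hrep
    unfold pvRep at hrep
    rw [List.any_eq_true] at hrep
    obtain ⟨p, hpf, hcond⟩ := hrep
    obtain ⟨hpmem, hple'⟩ := List.mem_filter.1 hpf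
    have hple : p ≤ i := by simpa using hple'
    have hp2' : 2 ≤ p := hp2 p hpmem
    rw [Bool.and_eq_true, beq_iff_eq, beq_iff_eq] at hcond
    obtain ⟨hmod, hsq⟩ := hcond
    rw [PySem.Int.mod_eq_emod_of_pos (by omega : (0:Int) < 2)] at hmod
    rw [PySem.Int.floordiv_eq_ediv_of_pos (by omega)] at hsq
    set m := (i - p) / 2 with hm
    set k := pvIsqrt m with hk
    have hk0 : 0 ≤ k := isqrt_nonneg m
    have hkk : k * k = m := by rw [← sq]; exact hsq
    have h2m : 2 * m = i - p := by omega
    refine ⟨k, ?_, ?_⟩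
    · rw [PySem.List.mem_pyRange_one]
      refine ⟨hk0, ?_⟩
      have hmle : m ≤ i / 2 := by omega
      have : pvIsqrt m ≤ pvIsqrt (i / 2) := isqrt_mono hmle
      rw [← hkk, isqrt_sq k hk0] at this
      rw [hfd]; omega
    · have heq : i - 2*k*k = p := by linear_combination (-2)*hkk - h2m
      rwa [heq]

-- the two fueled loops agree on any prime list whose members are ≥ 2
lemma loop_eq (ps : List Int) (hp2 : ∀ p ∈ ps, 2 ≤ p) (fuel : Nat) (i : Int) :
    pvLoopA ps fuel i = pvLoopB ps fuel i := by
  induction fuel generalizing i with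
  | zero => rfl
  | succ n ih =>
      simp only [pvLoopA, pvLoopB]
      have hlen : ((PySem.List.pyRange 0 (pvIsqrt (PySem.Int.floordiv i 2) + 1) 1).length : Int)
          = pvIsqrt (PySem.Int.floordiv i 2) + 1 := by
        rw [PySem.List.length_pyRange_one]
        have := isqrt_nonneg (PySem.Int.floordiv i 2)
        omega
      have hiff := inner_eq_length_iff i ps
        (PySem.List.pyRange 0 (pvIsqrt (PySem.Int.floordiv i 2) + 1) 1)
      rw [hlen] at hiff
      have hbool : (pvInner i ps (PySem.List.pyRange 0 (pvIsqrt (PySem.Int.floordiv i 2) + 1) 1)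
          == pvIsqrt (PySem.Int.floordiv i 2) + 1) = !(pvRep i ps) := by
        rcases Bool.eq_false_or_eq_true (pvRep i ps) with hr | hr
        · rw [hr]
          simp only [Bool.not_true]
          rw [beq_eq_false_iff_ne]
          intro heq
          obtain ⟨k, hkR, hkmem⟩ := (rep_iff i ps hp2).2 hr
          exact (hiff.1 heq) k hkR hkmem
        · rw [hr]
          simp only [Bool.not_false, beq_iff_eq]
          refine hiff.2 (fun k hk hmem => ?_)
          have : pvRep i ps = true := (rep_iff i ps hp2).1 ⟨k, hk, hmem⟩
          rw [hr] at this; exact Bool.noConfusion this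
      rw [hbool]
      rcases Bool.eq_false_or_eq_true (pvRep i ps) with hr | hr <;> rw [hr]
      · rw [if_neg (by simp), if_neg (by simp)]
        exact ih (i+2)
      · rw [if_pos (by simp), if_pos (by simp)]

-- ===== VERDICT (by name: the statement is the Claim_ definition above) =====
theorem solve_spec : Claim_equal_solve := by
  intro limit _
  unfold Spec_solve solve solve_alt
  rw [primes_eq]
  exact loop_eq _ (primesB_two_le limit) 3000 3
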